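-- pv_equiv track=rewrite | github.com/IBE-GIDEON/main-app-backend | main.py | _detect_format_contract
-- ===== SOURCE A (Python) =====
-- _FORMAT_CONTRACTS: dict[str, str] = {
--     "compare": (
--         "Respond with a single markdown table comparing the options. "
--         "Add one bold verdict line above the table. Nothing else."
--     ),
--     "explain": (
--         "Use ### headings and bullet points. Maximum 3 sections. "
--         "Each section must have a heading and 2-4 bullets. No walls of text."
--     ),
--     "summarize": (
--         "Return exactly three labelled blocks:\n"
--         "**TL;DR:** (1 sentence)\n"
--         "**Key Points:** (3-5 bullets)\n"
--         "**So What:** (1 sentence action or implication)\n"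
--         "No other text."
--     ),
--     "plan": (
--         "Return numbered steps only. "
--         "Each step: **Bold Title** — 1-2 sentence description. "
--         "End with a **Expected Outcome:** line. No other text."
--     ),
--     "email": (
--         "Return exactly two labelled fields:\n"
--         "**Subject:** ...\n\n"
--         "**Body:** ...\n\n"
--         "Professional tone. No preamble."
--     ),
--     "data": (
--         "Return a markdown table only. No prose before or after. "
--         "If data is unavailable, return a single line: *Insufficient data to generate table.*"
--     ),
--     "default": (
--         "Write like a senior analyst briefing an executive: "
--         "structured, direct, no filler. Use ### headings if the response exceeds 3 paragraphs. "
--         "Never open with affirmations or greetings."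
--     ),
-- }
--
-- def _detect_format_contract(query: str) -> str:
--     q = query.lower()
--     if any(w in q for w in ["compare", " vs ", "versus", "difference between", "which is better", "better than"]):
--         return _FORMAT_CONTRACTS["compare"]
--     if any(w in q for w in ["explain", "how does", "how do", "what is", "what are", "why does", "why is"]):
--         return _FORMAT_CONTRACTS["explain"]
--     if any(w in q for w in ["summarize", "summary", "tl;dr", "tldr", "overview", "recap"]):
--         return _FORMAT_CONTRACTS["summarize"]
--     if any(w in q for w in ["plan", "steps", "how to", "roadmap", "process for", "guide"]):
--         return _FORMAT_CONTRACTS["plan"]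
--     if any(w in q for w in ["email", "write to", "draft a", "draft an", "message to", "send to"]):
--         return _FORMAT_CONTRACTS["email"]
--     if any(w in q for w in ["table", "list", "show me", "data", "numbers", "breakdown"]):
--         return _FORMAT_CONTRACTS["data"]
--     return _FORMAT_CONTRACTS["default"]
-- ===== SOURCE B (Python) =====
-- _FORMAT_CONTRACTS: dict[str, str] = {
--     "compare": (
--         "Respond with a single markdown table comparing the options. "
--         "Add one bold verdict line above the table. Nothing else."
--     ),
--     "explain": (
--         "Use ### headings and bullet points. Maximum 3 sections. "
--         "Each section must have a heading and 2-4 bullets. No walls of text."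
--     ),
--     "summarize": (
--         "Return exactly three labelled blocks:\n"
--         "**TL;DR:** (1 sentence)\n"
--         "**Key Points:** (3-5 bullets)\n"
--         "**So What:** (1 sentence action or implication)\n"
--         "No other text."
--     ),
--     "plan": (
--         "Return numbered steps only. "
--         "Each step: **Bold Title** — 1-2 sentence description. "
--         "End with a **Expected Outcome:** line. No other text."
--     ),
--     "email": (
--         "Return exactly two labelled fields:\n"
--         "**Subject:** ...\n\n"
--         "**Body:** ...\n\n"
--         "Professional tone. No preamble."
--     ),
--     "data": (
--         "Return a markdown table only. No prose before or after. "
--         "If data is unavailable, return a single line: *Insufficient data to generate table.*"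
--     ),
--     "default": (
--         "Write like a senior analyst briefing an executive: "
--         "structured, direct, no filler. Use ### headings if the response exceeds 3 paragraphs. "
--         "Never open with affirmations or greetings."
--     ),
-- }
--
-- # Multi-pattern scan: every keyword tagged with the priority of its category.
-- _KEYWORD_PRIORITY: tuple[tuple[str, int], ...] = (
--     ("compare", 0), (" vs ", 0), ("versus", 0), ("difference between", 0),
--     ("which is better", 0), ("better than", 0),
--     ("explain", 1), ("how does", 1), ("how do", 1), ("what is", 1),
--     ("what are", 1), ("why does", 1), ("why is", 1),
--     ("summarize", 2), ("summary", 2), ("tl;dr", 2), ("tldr", 2),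
--     ("overview", 2), ("recap", 2),
--     ("plan", 3), ("steps", 3), ("how to", 3), ("roadmap", 3),
--     ("process for", 3), ("guide", 3),
--     ("email", 4), ("write to", 4), ("draft a", 4), ("draft an", 4),
--     ("message to", 4), ("send to", 4),
--     ("table", 5), ("list", 5), ("show me", 5), ("data", 5),
--     ("numbers", 5), ("breakdown", 5),
-- )
--
-- _PRIORITY_CONTRACTS: tuple[str, ...] = tuple(
--     _FORMAT_CONTRACTS[k]
--     for k in ("compare", "explain", "summarize", "plan", "email", "data")
-- )
--
-- def _detect_format_contract(query: str) -> str: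
--     # Single left-to-right scan: at every position test which keywords start
--     # there, keeping the smallest (highest-priority) category seen anywhere.
--     q = query.lower()
--     best = 6
--     for i in range(len(q)):
--         for kw, p in _KEYWORD_PRIORITY:
--             if p < best and q.startswith(kw, i):
--                 best = p
--     return _PRIORITY_CONTRACTS[best] if best < 6 else _FORMAT_CONTRACTS["default"]
-- ===== Notes on version B (the rewrite author's own statement) =====
-- stated objective: alternative
-- what changed: Replaces the six per-category substring-membership branches by a single left-to-right scan of the query that, at every position, tests which of the 37 priority-tagged keywords starts there and keeps the minimum category priority seen, indexing the contract table by that priority at the end.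
import Mathlib
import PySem

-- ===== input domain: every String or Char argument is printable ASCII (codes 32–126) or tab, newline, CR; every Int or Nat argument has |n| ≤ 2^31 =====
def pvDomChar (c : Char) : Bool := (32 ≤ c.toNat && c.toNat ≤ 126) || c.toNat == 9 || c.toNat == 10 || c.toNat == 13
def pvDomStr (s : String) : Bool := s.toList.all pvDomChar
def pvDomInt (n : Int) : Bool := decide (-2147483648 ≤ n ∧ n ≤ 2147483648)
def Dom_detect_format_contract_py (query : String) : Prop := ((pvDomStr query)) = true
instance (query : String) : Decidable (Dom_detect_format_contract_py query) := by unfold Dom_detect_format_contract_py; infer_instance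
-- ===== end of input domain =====

-- B replaces A's six substring-membership branches with one position-major scan of the query
-- keeping the minimum matching category priority (objective: alternative); same output everywhere.

-- ===== PORT A =====
def pvContractCompare : String :=
  "Respond with a single markdown table comparing the options. Add one bold verdict line above the table. Nothing else."
def pvContractExplain : String :=
  "Use ### headings and bullet points. Maximum 3 sections. Each section must have a heading and 2-4 bullets. No walls of text."
def pvContractSummarize : String :=
  "Return exactly three labelled blocks:\n**TL;DR:** (1 sentence)\n**Key Points:** (3-5 bullets)\n**So What:** (1 sentence action or implication)\nNo other text."
def pvContractPlan : String :=
  "Return numbered steps only. Each step: **Bold Title** — 1-2 sentence description. End with a **Expected Outcome:** line. No other text."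
def pvContractEmail : String :=
  "Return exactly two labelled fields:\n**Subject:** ...\n\n**Body:** ...\n\nProfessional tone. No preamble."
def pvContractData : String :=
  "Return a markdown table only. No prose before or after. If data is unavailable, return a single line: *Insufficient data to generate table.*"
def pvContractDefault : String :=
  "Write like a senior analyst briefing an executive: structured, direct, no filler. Use ### headings if the response exceeds 3 paragraphs. Never open with affirmations or greetings."

-- _FORMAT_CONTRACTS as an association list in insertion order (dict → List (K × V))
def pvFormatContracts : PySem.Dict String String :=
  PySem.Dict.ofList [("compare", pvContractCompare), ("explain", pvContractExplain),
   ("summarize", pvContractSummarize), ("plan", pvContractPlan),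
   ("email", pvContractEmail), ("data", pvContractData), ("default", pvContractDefault)]

def detect_format_contract_py (query : String) : String :=
  let q := PySem.Str.lower query
  if ["compare", " vs ", "versus", "difference between", "which is better", "better than"].any
      (fun w => PySem.Str.isIn w q) then (PySem.Dict.getD pvFormatContracts "compare" "")
  else if ["explain", "how does", "how do", "what is", "what are", "why does", "why is"].any
      (fun w => PySem.Str.isIn w q) then (PySem.Dict.getD pvFormatContracts "explain" "")
  else if ["summarize", "summary", "tl;dr", "tldr", "overview", "recap"].any
      (fun w => PySem.Str.isIn w q) then (PySem.Dict.getD pvFormatContracts "summarize" "")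
  else if ["plan", "steps", "how to", "roadmap", "process for", "guide"].any
      (fun w => PySem.Str.isIn w q) then (PySem.Dict.getD pvFormatContracts "plan" "")
  else if ["email", "write to", "draft a", "draft an", "message to", "send to"].any
      (fun w => PySem.Str.isIn w q) then (PySem.Dict.getD pvFormatContracts "email" "")
  else if ["table", "list", "show me", "data", "numbers", "breakdown"].any
      (fun w => PySem.Str.isIn w q) then (PySem.Dict.getD pvFormatContracts "data" "")
  else (PySem.Dict.getD pvFormatContracts "default" "")

-- ===== PORT B =====
-- Source B's _KEYWORD_PRIORITY table: every keyword tagged with its category priority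
def pvKeywordPriority : List (String × Nat) :=
  [("compare", 0), (" vs ", 0), ("versus", 0), ("difference between", 0),
   ("which is better", 0), ("better than", 0),
   ("explain", 1), ("how does", 1), ("how do", 1), ("what is", 1),
   ("what are", 1), ("why does", 1), ("why is", 1),
   ("summarize", 2), ("summary", 2), ("tl;dr", 2), ("tldr", 2),
   ("overview", 2), ("recap", 2),
   ("plan", 3), ("steps", 3), ("how to", 3), ("roadmap", 3),
   ("process for", 3), ("guide", 3),
   ("email", 4), ("write to", 4), ("draft a", 4), ("draft an", 4),
   ("message to", 4), ("send to", 4),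
   ("table", 5), ("list", 5), ("show me", 5), ("data", 5),
   ("numbers", 5), ("breakdown", 5)]

-- Source B's _PRIORITY_CONTRACTS
def pvPriorityContracts : List String :=
  (["compare", "explain", "summarize", "plan", "email", "data"]).map
    (fun k => PySem.Dict.getD pvFormatContracts k "")

-- inner loop of Source B: for kw, p in _KEYWORD_PRIORITY: if p < best and q.startswith(kw, i): best = p
-- (q.startswith(kw, i) with 0 ≤ i is exactly: kw starts the suffix q[i:], i.e. startswith on q.drop i)
def pvBInner (q : List Char) (i : Int) (b : Nat) : Nat :=
  pvKeywordPriority.foldl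
    (fun b kp => if kp.2 < b ∧ PySem.Chars.startswith (q.drop i.toNat) kp.1.toList then kp.2 else b) b

-- outer loop of Source B: for i in range(len(q)), accumulator best starting at 6
def pvBBest (q : List Char) : Nat :=
  (PySem.List.pyRange 0 q.length 1).foldl (fun b i => pvBInner q i b) 6

def detect_format_contract_py_alt (query : String) : String :=
  let q := PySem.Chars.lower query.toList
  let best := pvBBest q
  if best < 6 then pvPriorityContracts.getD best ""
  else PySem.Dict.getD pvFormatContracts "default" ""

-- ===== PRECONDITION & SPEC =====
def Spec_detect_format_contract_py (query : String) (out : String) : Prop := out = detect_format_contract_py_alt query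
instance (query : String) (out : String) : Decidable (Spec_detect_format_contract_py query out) := by unfold Spec_detect_format_contract_py; infer_instance

-- ===== CLAIM =====
def Claim_equal_detect_format_contract_py : Prop := ∀ (query : String), Dom_detect_format_contract_py query → Spec_detect_format_contract_py query (detect_format_contract_py query)

-- ===== LEMMAS AND PROOFS =====

-- the inner fold never increases the accumulator
theorem pvInner_le (s : List Char) (l : List (String × Nat)) (b : Nat) :
    l.foldl (fun b kp => if kp.2 < b ∧ PySem.Chars.startswith s kp.1.toList then kp.2 else b) b ≤ b := by
  induction l generalizing b with
  | nil => simp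
  | cons x xs ih =>
    simp only [List.foldl]
    split_ifs with h
    · exact le_trans (ih x.2) (le_of_lt h.1)
    · exact ih b

-- the inner fold's value is the start or a matching priority
theorem pvInner_achieved (s : List Char) (l : List (String × Nat)) (b : Nat) :
    (l.foldl (fun b kp => if kp.2 < b ∧ PySem.Chars.startswith s kp.1.toList then kp.2 else b) b) = b ∨
    ∃ kp ∈ l, (l.foldl (fun b kp => if kp.2 < b ∧ PySem.Chars.startswith s kp.1.toList then kp.2 else b) b) = kp.2 ∧
      PySem.Chars.startswith s kp.1.toList = true := by
  induction l generalizing b with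
  | nil => simp
  | cons x xs ih =>
    simp only [List.foldl]
    split_ifs with h
    · rcases ih x.2 with h1 | ⟨kp, hkp, h1, h2⟩
      · exact Or.inr ⟨x, by simp, h1, h.2⟩
      · exact Or.inr ⟨kp, by simp [hkp], h1, h2⟩
    · rcases ih b with h1 | ⟨kp, hkp, h1, h2⟩
      · exact Or.inl h1
      · exact Or.inr ⟨kp, by simp [hkp], h1, h2⟩

-- the inner fold is a lower bound for every matching priority
theorem pvInner_lb (s : List Char) (l : List (String × Nat)) (b : Nat) :
    ∀ kp ∈ l, PySem.Chars.startswith s kp.1.toList = true →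
      (l.foldl (fun b kp => if kp.2 < b ∧ PySem.Chars.startswith s kp.1.toList then kp.2 else b) b) ≤ kp.2 := by
  induction l generalizing b with
  | nil => simp
  | cons x xs ih =>
    intro kp hkp hsw
    rcases List.mem_cons.mp hkp with rfl | hmem
    · simp only [List.foldl]
      split_ifs with h
      · exact pvInner_le s xs kp.2
      · have : ¬ kp.2 < b := fun hlt => h ⟨hlt, hsw⟩
        exact le_trans (pvInner_le s xs b) (by omega)
    · simp only [List.foldl]
      split_ifs with h <;> exact ih _ kp hmem hsw

theorem pvBInner_le (q : List Char) (i : Int) (b : Nat) : pvBInner q i b ≤ b := by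
  unfold pvBInner; exact pvInner_le _ _ _

theorem pvBInner_achieved (q : List Char) (i : Int) (b : Nat) :
    pvBInner q i b = b ∨ ∃ kp ∈ pvKeywordPriority, pvBInner q i b = kp.2 ∧
      PySem.Chars.startswith (q.drop i.toNat) kp.1.toList = true := by
  unfold pvBInner; exact pvInner_achieved _ _ _

theorem pvBInner_lb (q : List Char) (i : Int) (b : Nat) :
    ∀ kp ∈ pvKeywordPriority, PySem.Chars.startswith (q.drop i.toNat) kp.1.toList = true →
      pvBInner q i b ≤ kp.2 := by
  unfold pvBInner; exact pvInner_lb _ _ _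

-- combined spec of the outer fold over an arbitrary list of positions
theorem pvOuter_spec (q : List Char) (l : List Int) (b : Nat) :
    (l.foldl (fun b i => pvBInner q i b) b) ≤ b ∧
    ((l.foldl (fun b i => pvBInner q i b) b) = b ∨
      ∃ i ∈ l, ∃ kp ∈ pvKeywordPriority,
        (l.foldl (fun b i => pvBInner q i b) b) = kp.2 ∧
        PySem.Chars.startswith (q.drop i.toNat) kp.1.toList = true) ∧
    (∀ i ∈ l, ∀ kp ∈ pvKeywordPriority,
      PySem.Chars.startswith (q.drop i.toNat) kp.1.toList = true →
      (l.foldl (fun b i => pvBInner q i b) b) ≤ kp.2) := by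
  induction l generalizing b with
  | nil => simp
  | cons x xs ih =>
    simp only [List.foldl]
    obtain ⟨ihle, ihach, ihlb⟩ := ih (pvBInner q x b)
    refine ⟨le_trans ihle (pvBInner_le q x b), ?_, ?_⟩
    · rcases ihach with h1 | ⟨i, hi, kp, hkp, h2, h3⟩
      · rcases pvBInner_achieved q x b with h2 | ⟨kp, hkp, h2, h3⟩
        · exact Or.inl (h1.trans h2)
        · exact Or.inr ⟨x, by simp, kp, hkp, h1.trans h2, h3⟩
      · exact Or.inr ⟨i, by simp [hi], kp, hkp, h2, h3⟩
    · intro i hi kp hkp hsw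
      rcases List.mem_cons.mp hi with rfl | hmem
      · exact le_trans ihle (pvBInner_lb q i b kp hkp hsw)
      · exact ihlb i hmem kp hkp hsw

-- every keyword of the table is nonempty and has priority < 6
set_option maxRecDepth 8192 in
theorem pvTable_facts : pvKeywordPriority.all (fun kp => !kp.1.toList.isEmpty && decide (kp.2 < 6)) = true := by
  decide

-- isIn ↔ a matching start position inside the scanned range
theorem pvBBest_lb (q : List Char) :
    ∀ kp ∈ pvKeywordPriority, PySem.Chars.isIn kp.1.toList q = true → pvBBest q ≤ kp.2 := by
  intro kp hkp hin
  obtain ⟨j, hj⟩ := (PySem.Chars.exists_prefix_drop_iff_isIn kp.1.toList q).mpr hin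
  have hne : kp.1.toList ≠ [] ∧ kp.2 < 6 := by
    have := List.all_eq_true.mp pvTable_facts kp hkp
    simp only [Bool.and_eq_true, Bool.not_eq_true', List.isEmpty_eq_false_iff, decide_eq_true_eq] at this
    exact this
  have hjlt : j < q.length := by
    by_contra h
    have : q.drop j = [] := List.drop_eq_nil_of_le (by omega)
    rw [this] at hj
    exact hne.1 (List.prefix_nil.mp hj)
  have hmem : (j : Int) ∈ PySem.List.pyRange 0 q.length 1 := by
    rw [PySem.List.mem_pyRange_one]; constructor <;> [positivity; exact_mod_cast hjlt]
  have hsw : PySem.Chars.startswith (q.drop (j : Int).toNat) kp.1.toList = true := by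
    rw [PySem.Chars.startswith_iff]; simpa using hj
  exact (pvOuter_spec q _ 6).2.2 _ hmem kp hkp hsw

theorem pvBBest_achieved (q : List Char) :
    pvBBest q = 6 ∨ ∃ kp ∈ pvKeywordPriority, pvBBest q = kp.2 ∧ PySem.Chars.isIn kp.1.toList q = true := by
  rcases (pvOuter_spec q (PySem.List.pyRange 0 q.length 1) 6).2.1 with h | ⟨i, _, kp, hkp, h1, h2⟩
  · exact Or.inl h
  · refine Or.inr ⟨kp, hkp, h1, ?_⟩
    exact (PySem.Chars.exists_prefix_drop_iff_isIn _ _).mp ⟨i.toNat, (PySem.Chars.startswith_iff _ _).mp h2⟩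

-- the table's priority-p slice matches iff A's p-th branch condition holds
theorem pvMatch0 (q : List Char) :
    (∃ kp ∈ pvKeywordPriority, kp.2 = 0 ∧ PySem.Chars.isIn kp.1.toList q = true) ↔
    (["compare", " vs ", "versus", "difference between", "which is better", "better than"].any
      (fun w => PySem.Chars.isIn w.toList q)) = true := by
  simp [pvKeywordPriority]

theorem pvMatch1 (q : List Char) :
    (∃ kp ∈ pvKeywordPriority, kp.2 = 1 ∧ PySem.Chars.isIn kp.1.toList q = true) ↔
    (["explain", "how does", "how do", "what is", "what are", "why does", "why is"].any
      (fun w => PySem.Chars.isIn w.toList q)) = true := by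
  simp [pvKeywordPriority]

theorem pvMatch2 (q : List Char) :
    (∃ kp ∈ pvKeywordPriority, kp.2 = 2 ∧ PySem.Chars.isIn kp.1.toList q = true) ↔
    (["summarize", "summary", "tl;dr", "tldr", "overview", "recap"].any
      (fun w => PySem.Chars.isIn w.toList q)) = true := by
  simp [pvKeywordPriority]

theorem pvMatch3 (q : List Char) :
    (∃ kp ∈ pvKeywordPriority, kp.2 = 3 ∧ PySem.Chars.isIn kp.1.toList q = true) ↔
    (["plan", "steps", "how to", "roadmap", "process for", "guide"].any
      (fun w => PySem.Chars.isIn w.toList q)) = true := by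
  simp [pvKeywordPriority]

theorem pvMatch4 (q : List Char) :
    (∃ kp ∈ pvKeywordPriority, kp.2 = 4 ∧ PySem.Chars.isIn kp.1.toList q = true) ↔
    (["email", "write to", "draft a", "draft an", "message to", "send to"].any
      (fun w => PySem.Chars.isIn w.toList q)) = true := by
  simp [pvKeywordPriority]

theorem pvMatch5 (q : List Char) :
    (∃ kp ∈ pvKeywordPriority, kp.2 = 5 ∧ PySem.Chars.isIn kp.1.toList q = true) ↔
    (["table", "list", "show me", "data", "numbers", "breakdown"].any
      (fun w => PySem.Chars.isIn w.toList q)) = true := by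
  simp [pvKeywordPriority]

-- ===== VERDICT =====
theorem detect_format_contract_py_spec : Claim_equal_detect_format_contract_py := by
  intro query _
  unfold Spec_detect_format_contract_py detect_format_contract_py
  simp only [PySem.Str.isIn_eq, PySem.Str.toList_lower]
  set ql := PySem.Chars.lower query.toList with hql
  have hach := pvBBest_achieved ql
  have hlb := pvBBest_lb ql
  have hlt6 : ∀ kp ∈ pvKeywordPriority, kp.2 < 6 := by
    intro kp hkp
    have := List.all_eq_true.mp pvTable_facts kp hkp
    simp only [Bool.and_eq_true, decide_eq_true_eq] at this
    exact this.2
  have halt : detect_format_contract_py_alt query =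
      (if pvBBest ql < 6 then pvPriorityContracts.getD (pvBBest ql) ""
       else PySem.Dict.getD pvFormatContracts "default" "") := rfl
  split_ifs with h0 h1 h2 h3 h4 h5
  · -- compare
    have hr : pvBBest ql = 0 := by
      obtain ⟨kp, hkp, hp, hin⟩ := (pvMatch0 ql).mpr h0
      have := hp ▸ hlb kp hkp hin
      omega
    rw [halt, hr]; rfl
  · -- explain
    have hr : pvBBest ql = 1 := by
      obtain ⟨kp, hkp, hp, hin⟩ := (pvMatch1 ql).mpr h1
      have hle := hp ▸ hlb kp hkp hin
      rcases hach with h6 | ⟨kp', hkp', heq, hin'⟩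
      · omega
      · have hne0 : kp'.2 ≠ 0 := fun h => h0 ((pvMatch0 ql).mp ⟨kp', hkp', h, hin'⟩)
        omega
    rw [halt, hr]; rfl
  · -- summarize
    have hr : pvBBest ql = 2 := by
      obtain ⟨kp, hkp, hp, hin⟩ := (pvMatch2 ql).mpr h2
      have hle := hp ▸ hlb kp hkp hin
      rcases hach with h6 | ⟨kp', hkp', heq, hin'⟩
      · omega
      · have hne0 : kp'.2 ≠ 0 := fun h => h0 ((pvMatch0 ql).mp ⟨kp', hkp', h, hin'⟩)
        have hne1 : kp'.2 ≠ 1 := fun h => h1 ((pvMatch1 ql).mp ⟨kp', hkp', h, hin'⟩)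
        omega
    rw [halt, hr]; rfl
  · -- plan
    have hr : pvBBest ql = 3 := by
      obtain ⟨kp, hkp, hp, hin⟩ := (pvMatch3 ql).mpr h3
      have hle := hp ▸ hlb kp hkp hin
      rcases hach with h6 | ⟨kp', hkp', heq, hin'⟩
      · omega
      · have hne0 : kp'.2 ≠ 0 := fun h => h0 ((pvMatch0 ql).mp ⟨kp', hkp', h, hin'⟩)
        have hne1 : kp'.2 ≠ 1 := fun h => h1 ((pvMatch1 ql).mp ⟨kp', hkp', h, hin'⟩)
        have hne2 : kp'.2 ≠ 2 := fun h => h2 ((pvMatch2 ql).mp ⟨kp', hkp', h, hin'⟩)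
        omega
    rw [halt, hr]; rfl
  · -- email
    have hr : pvBBest ql = 4 := by
      obtain ⟨kp, hkp, hp, hin⟩ := (pvMatch4 ql).mpr h4
      have hle := hp ▸ hlb kp hkp hin
      rcases hach with h6 | ⟨kp', hkp', heq, hin'⟩
      · omega
      · have hne0 : kp'.2 ≠ 0 := fun h => h0 ((pvMatch0 ql).mp ⟨kp', hkp', h, hin'⟩)
        have hne1 : kp'.2 ≠ 1 := fun h => h1 ((pvMatch1 ql).mp ⟨kp', hkp', h, hin'⟩)
        have hne2 : kp'.2 ≠ 2 := fun h => h2 ((pvMatch2 ql).mp ⟨kp', hkp', h, hin'⟩)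
        have hne3 : kp'.2 ≠ 3 := fun h => h3 ((pvMatch3 ql).mp ⟨kp', hkp', h, hin'⟩)
        omega
    rw [halt, hr]; rfl
  · -- data
    have hr : pvBBest ql = 5 := by
      obtain ⟨kp, hkp, hp, hin⟩ := (pvMatch5 ql).mpr h5
      have hle := hp ▸ hlb kp hkp hin
      rcases hach with h6 | ⟨kp', hkp', heq, hin'⟩
      · omega
      · have hne0 : kp'.2 ≠ 0 := fun h => h0 ((pvMatch0 ql).mp ⟨kp', hkp', h, hin'⟩)
        have hne1 : kp'.2 ≠ 1 := fun h => h1 ((pvMatch1 ql).mp ⟨kp', hkp', h, hin'⟩)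
        have hne2 : kp'.2 ≠ 2 := fun h => h2 ((pvMatch2 ql).mp ⟨kp', hkp', h, hin'⟩)
        have hne3 : kp'.2 ≠ 3 := fun h => h3 ((pvMatch3 ql).mp ⟨kp', hkp', h, hin'⟩)
        have hne4 : kp'.2 ≠ 4 := fun h => h4 ((pvMatch4 ql).mp ⟨kp', hkp', h, hin'⟩)
        omega
    rw [halt, hr]; rfl
  · -- default
    have hr : pvBBest ql = 6 := by
      rcases hach with h6 | ⟨kp', hkp', heq, hin'⟩
      · exact h6
      · exfalso
        have hv := hlt6 kp' hkp'
        have hne0 : kp'.2 ≠ 0 := fun h => h0 ((pvMatch0 ql).mp ⟨kp', hkp', h, hin'⟩)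
        have hne1 : kp'.2 ≠ 1 := fun h => h1 ((pvMatch1 ql).mp ⟨kp', hkp', h, hin'⟩)
        have hne2 : kp'.2 ≠ 2 := fun h => h2 ((pvMatch2 ql).mp ⟨kp', hkp', h, hin'⟩)
        have hne3 : kp'.2 ≠ 3 := fun h => h3 ((pvMatch3 ql).mp ⟨kp', hkp', h, hin'⟩)
        have hne4 : kp'.2 ≠ 4 := fun h => h4 ((pvMatch4 ql).mp ⟨kp', hkp', h, hin'⟩)
        have hne5 : kp'.2 ≠ 5 := fun h => h5 ((pvMatch5 ql).mp ⟨kp', hkp', h, hin'⟩)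
        omega
    rw [halt, hr]; rfl
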